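-- pv_equiv track=rewrite | github.com/MrBrantCode/unitest_baseline | mut_generate/mist_train_taco/taco_6071/solution.py | find_closest_palindrome
-- ===== SOURCE A (Python) =====
-- def find_closest_palindrome(n: int) -> int:
--     # Generate all palindromes up to 10^4
--     palindromes = []
--     for i in range(1, 100):
--         t = str(i)
--         palindromes.append(int(t + t[::-1]))
--         for j in range(10):
--             palindromes.append(int(t + str(j) + t[::-1]))
--     palindromes = sorted(set(palindromes))
--
--     # Find the closest palindrome to n
--     if n in palindromes:
--         return n
--     elif n < palindromes[0]:
--         return palindromes[0]
--     elif n > palindromes[-1]: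
--         return palindromes[-1]
--     else:
--         closest_palindrome = 0
--         min_diff = float('inf')
--         for palindrome in palindromes:
--             if abs(palindrome - n) < min_diff:
--                 min_diff = abs(palindrome - n)
--                 closest_palindrome = palindrome
--         return closest_palindrome
-- ===== SOURCE B (Python) =====
-- def find_closest_palindrome(n: int) -> int:
--     # Build the same sorted palindrome list (11..99999) arithmetically, then binary-search.
--     pal = [11 * i for i in range(1, 10)]
--     pal += [101 * i + 10 * j for i in range(1, 10) for j in range(10)]
--     pal += [1001 * a + 110 * b for a in range(1, 10) for b in range(10)]
--     pal += [10001 * a + 1010 * b + 100 * j for a in range(1, 10) for b in range(10) for j in range(10)]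
--     lo, hi = 0, len(pal)
--     while lo < hi:
--         mid = (lo + hi) // 2
--         if pal[mid] < n:
--             lo = mid + 1
--         else:
--             hi = mid
--     if lo == 0:
--         return pal[0]
--     if lo == len(pal):
--         return pal[-1]
--     left, right = pal[lo - 1], pal[lo]
--     return left if n - left <= right - n else right
-- ===== Notes on version B (the rewrite author's own statement) =====
-- stated objective: alternative
-- what changed: B builds the sorted palindrome list directly by digit arithmetic (four already-ordered comprehensions, no strings, no set, no sort) and replaces A's membership test, boundary guards and linear min-scan with a single hand-written binary search picking between the two neighbouring palindromes with the same tie-break.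
import Mathlib
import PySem

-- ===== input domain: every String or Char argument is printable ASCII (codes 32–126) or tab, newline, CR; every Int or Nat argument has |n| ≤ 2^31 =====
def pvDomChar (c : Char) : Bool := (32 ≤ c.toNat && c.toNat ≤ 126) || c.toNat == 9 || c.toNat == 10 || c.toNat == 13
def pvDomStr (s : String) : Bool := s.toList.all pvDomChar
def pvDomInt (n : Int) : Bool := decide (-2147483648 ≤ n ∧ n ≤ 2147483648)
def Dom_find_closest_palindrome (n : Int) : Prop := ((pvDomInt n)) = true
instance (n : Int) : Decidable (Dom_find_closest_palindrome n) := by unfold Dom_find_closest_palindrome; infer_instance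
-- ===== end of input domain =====

-- B replaces A's string-built, sorted/deduped palindrome table and linear min-scan by an
-- arithmetically built (already sorted) table and a hand-written binary search over it
-- (same values, same tie-break); alternative decomposition, no speed claim.

-- ===== PORT A =====
-- abs(x) on ints
def pvAbs (x : Int) : Int := if x < 0 then -x else x
-- t[::-1]  (PySem.List.slice? with step -1; list is never empty so getD never fires)
def pvRevA (t : List Char) : List Char := (PySem.List.slice? t none none (-1)).getD []
-- int(s) on a string of digits (always parses, so the ValueError default never fires)
def pvIntOf (cs : List Char) : Int := (PySem.Int.ofChars? cs).getD 0
-- int(t + t[::-1]) with t = str(i)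
def pvE (i : Int) : Int := pvIntOf (PySem.Int.toChars i ++ pvRevA (PySem.Int.toChars i))
-- int(t + str(j) + t[::-1])
def pvO (i j : Int) : Int := pvIntOf (PySem.Int.toChars i ++ PySem.Int.toChars j ++ pvRevA (PySem.Int.toChars i))

-- the generation loops of A (append = ++ [x])
def pvRawA : List Int :=
  (PySem.List.pyRange 1 100 1).foldl (fun acc i =>
    (PySem.List.pyRange 0 10 1).foldl (fun acc2 j => acc2 ++ [pvO i j]) (acc ++ [pvE i])) []

-- palindromes = sorted(set(palindromes))
def pvPalsA : List Int := PySem.List.sorted (PySem.Set.ofList pvRawA) (fun x => x) false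

-- one step of A's min-scan; state = (closest_palindrome, min_diff), none = float('inf')
def pvScanStep (n : Int) (st : Int × Option Int) (p : Int) : Int × Option Int :=
  match st.2 with
  | none => (p, some (pvAbs (p - n)))
  | some m => if pvAbs (p - n) < m then (p, some (pvAbs (p - n))) else st

def find_closest_palindrome (n : Int) : Int :=
  let palindromes := pvPalsA
  if palindromes.contains n then n
  else if n < PySem.List.pyGetD palindromes 0 0 then PySem.List.pyGetD palindromes 0 0
  else if PySem.List.pyGetD palindromes (-1) 0 < n then PySem.List.pyGetD palindromes (-1) 0
  else (palindromes.foldl (pvScanStep n) (0, none)).1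

-- ===== PORT B =====
-- the four comprehensions of Source B, already in ascending order
def pvPalB : List Int :=
  ((PySem.List.pyRange 1 10 1).map (fun i => 11 * i))
  ++ ((PySem.List.pyRange 1 10 1).flatMap (fun i => (PySem.List.pyRange 0 10 1).map (fun j => 101 * i + 10 * j)))
  ++ ((PySem.List.pyRange 1 10 1).flatMap (fun a => (PySem.List.pyRange 0 10 1).map (fun b => 1001 * a + 110 * b)))
  ++ ((PySem.List.pyRange 1 10 1).flatMap (fun a => (PySem.List.pyRange 0 10 1).flatMap (fun b => (PySem.List.pyRange 0 10 1).map (fun j => 10001 * a + 1010 * b + 100 * j))))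

-- the while-loop of Source B (lo, hi are the loop variables; both stay ≥ 0, so Nat)
def pvBisect (pal : List Int) (n : Int) (lo hi : Nat) : Nat :=
  if lo < hi then
    let mid := (lo + hi) / 2
    if PySem.List.pyGetD pal (mid : Int) 0 < n then pvBisect pal n (mid + 1) hi
    else pvBisect pal n lo mid
  else lo
termination_by hi - lo
decreasing_by all_goals omega

def find_closest_palindrome_alt (n : Int) : Int :=
  let pal := pvPalB
  let lo := pvBisect pal n 0 pal.length
  if lo = 0 then PySem.List.pyGetD pal 0 0
  else if lo = pal.length then PySem.List.pyGetD pal (-1) 0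
  else
    let left := PySem.List.pyGetD pal ((lo : Int) - 1) 0
    let right := PySem.List.pyGetD pal ((lo : Int)) 0
    if n - left ≤ right - n then left else right

-- ===== PRECONDITION & SPEC =====
def Spec_find_closest_palindrome (n : Int) (out : Int) : Prop := out = find_closest_palindrome_alt n
instance (n : Int) (out : Int) : Decidable (Spec_find_closest_palindrome n out) := by unfold Spec_find_closest_palindrome; infer_instance

-- ===== CLAIM (what is proved, stated in full; the proofs are below) =====
def Claim_equal_find_closest_palindrome : Prop := ∀ (n : Int), Dom_find_closest_palindrome n → Spec_find_closest_palindrome n (find_closest_palindrome n)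

-- ===== LEMMAS AND PROOFS =====

-- A's i-block: the even palindrome, then the ten odd ones
def pvBlockA (i : Int) : List Int := pvE i :: (PySem.List.pyRange 0 10 1).map (pvO i)

lemma rawA_eq_flatMap : pvRawA = (PySem.List.pyRange 1 100 1).flatMap pvBlockA := by
  unfold pvRawA
  rw [show (fun (acc : List Int) i =>
        (PySem.List.pyRange 0 10 1).foldl (fun acc2 j => acc2 ++ [pvO i j]) (acc ++ [pvE i]))
      = (fun acc i => acc ++ pvBlockA i) from funext₂ (fun acc i => by
        rw [PySem.List.foldl_append_singleton_eq_map]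
        simp [pvBlockA])]
  rw [PySem.List.foldl_append_eq_flatMap]
  simp

lemma perm_flatMap_cons_map {α β : Type} (xs : List α) (f : α → β) (g : α → List β) :
    (xs.flatMap (fun x => f x :: g x)).Perm (xs.map f ++ xs.flatMap g) := by
  induction xs with
  | nil => simp
  | cons x xs ih =>
    simp only [List.flatMap_cons, List.map_cons, List.cons_append]
    refine List.Perm.cons _ ?_
    refine (ih.append_left (g x)).trans ?_
    rw [← List.append_assoc, ← List.append_assoc]
    exact (List.perm_append_comm).append_right _

set_option maxRecDepth 40000 in
lemma rangeSplit : PySem.List.pyRange 1 100 1 = PySem.List.pyRange 1 10 1 ++ PySem.List.pyRange 10 100 1 := by decide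

set_option maxRecDepth 40000 in
lemma g2 : (PySem.List.pyRange 1 10 1).map pvE = (PySem.List.pyRange 1 10 1).map (fun i => 11 * i) := by decide
set_option maxRecDepth 40000 in
lemma g3 : (PySem.List.pyRange 1 10 1).flatMap (fun i => (PySem.List.pyRange 0 10 1).map (pvO i))
    = (PySem.List.pyRange 1 10 1).flatMap (fun i => (PySem.List.pyRange 0 10 1).map (fun j => 101 * i + 10 * j)) := by decide
set_option maxRecDepth 40000 in
lemma g4 : (PySem.List.pyRange 10 100 1).map pvE
    = (PySem.List.pyRange 1 10 1).flatMap (fun a => (PySem.List.pyRange 0 10 1).map (fun b => 1001 * a + 110 * b)) := by decide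
set_option maxRecDepth 40000 in
lemma g5 : (PySem.List.pyRange 10 100 1).flatMap (fun i => (PySem.List.pyRange 0 10 1).map (pvO i))
    = (PySem.List.pyRange 1 10 1).flatMap (fun a => (PySem.List.pyRange 0 10 1).flatMap (fun b => (PySem.List.pyRange 0 10 1).map (fun j => 10001 * a + 1010 * b + 100 * j))) := by decide

lemma rawA_perm_palB : pvRawA.Perm pvPalB := by
  rw [rawA_eq_flatMap, rangeSplit, List.flatMap_append]
  unfold pvBlockA pvPalB
  have h1 := perm_flatMap_cons_map (PySem.List.pyRange 1 10 1) pvE (fun i => (PySem.List.pyRange 0 10 1).map (pvO i))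
  have h2 := perm_flatMap_cons_map (PySem.List.pyRange 10 100 1) pvE (fun i => (PySem.List.pyRange 0 10 1).map (pvO i))
  rw [g2, g3] at h1
  rw [g4, g5] at h2
  simpa [List.append_assoc] using h1.append h2

set_option maxRecDepth 40000 in
lemma chainB : List.IsChain (· < ·) pvPalB := by decide

lemma pairB : pvPalB.Pairwise (· < ·) := chainB.pairwise

lemma nodupB : pvPalB.Nodup := pairB.imp (fun h => ne_of_lt h)

lemma palsA_eq_palB : pvPalsA = pvPalB := by
  have hnodA : pvRawA.Nodup := (rawA_perm_palB.nodup_iff).mpr nodupB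
  unfold pvPalsA
  have h1 : PySem.Set.ofList pvRawA = pvRawA := PySem.Set.ofList_eq_self_of_nodup pvRawA hnodA
  rw [h1]
  exact PySem.List.sorted_eq_of_perm_of_pairwise_lt pvRawA pvPalB (fun x => x) rawA_perm_palB.symm pairB

set_option maxRecDepth 40000 in
lemma lenB : pvPalB.length = 1089 := by decide
set_option maxRecDepth 40000 in
lemma firstB : PySem.List.pyGetD pvPalB 0 0 = 11 := by decide
set_option maxRecDepth 40000 in
lemma lastB : PySem.List.pyGetD pvPalB (-1) 0 = 99999 := by decide

-- monotone access
lemma monoB {i j : Nat} (hi : i < j) (hj : j < pvPalB.length) :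
    pvPalB[i]'(by omega) < pvPalB[j]'(hj) :=
  List.pairwise_iff_getElem.mp pairB i j (by omega) hj hi

-- i-th entry of the table, as Source B's pal[i]
lemma getB_eq (i : Nat) (h : i < pvPalB.length) :
    PySem.List.pyGetD pvPalB (i : Int) 0 = pvPalB[i] := by
  rw [PySem.List.pyGetD_eq_getElem pvPalB 0 (by omega) (by exact_mod_cast h)]
  simp

lemma pvBisect_step (pal : List Int) (n : Int) (lo hi : Nat) (h : lo < hi) :
    pvBisect pal n lo hi =
      if PySem.List.pyGetD pal (((lo + hi) / 2 : Nat) : Int) 0 < n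
      then pvBisect pal n ((lo + hi) / 2 + 1) hi
      else pvBisect pal n lo ((lo + hi) / 2) := by
  rw [pvBisect, if_pos h]

lemma pvBisect_base (pal : List Int) (n : Int) (lo hi : Nat) (h : ¬ lo < hi) :
    pvBisect pal n lo hi = lo := by
  rw [pvBisect, if_neg h]

-- binary-search invariant
lemma pvBisect_spec (n : Int) : ∀ (fuel lo hi : Nat), hi - lo ≤ fuel → lo ≤ hi → hi ≤ pvPalB.length →
    (∀ k (hk : k < pvPalB.length), k < lo → pvPalB[k] < n) →
    (∀ k (hk : k < pvPalB.length), hi ≤ k → n ≤ pvPalB[k]) →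
    lo ≤ pvBisect pvPalB n lo hi ∧ pvBisect pvPalB n lo hi ≤ hi ∧
    (∀ k (hk : k < pvPalB.length), (k < pvBisect pvPalB n lo hi → pvPalB[k] < n) ∧
      (pvBisect pvPalB n lo hi ≤ k → n ≤ pvPalB[k])) := by
  intro fuel
  induction fuel with
  | zero =>
    intro lo hi hf hle hlen hlo hhi
    have : lo = hi := by omega
    rw [pvBisect_base _ _ _ _ (by omega)]
    subst this
    exact ⟨le_refl _, le_refl _, fun k hk => ⟨fun h => hlo k hk h, fun h => hhi k hk h⟩⟩
  | succ f ih =>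
    intro lo hi hf hle hlen hlo hhi
    by_cases hlt : lo < hi
    · rw [pvBisect_step _ _ _ _ hlt]
      have hmid1 : lo ≤ (lo + hi) / 2 := by omega
      have hmid2 : (lo + hi) / 2 < hi := by omega
      have hmidlen : (lo + hi) / 2 < pvPalB.length := by omega
      rw [getB_eq _ hmidlen]
      by_cases hcmp : pvPalB[(lo + hi) / 2] < n
      · rw [if_pos hcmp]
        refine (ih ((lo + hi) / 2 + 1) hi (by omega) (by omega) hlen ?_ hhi).imp (by omega) id
        intro k hk hklt
        rcases Nat.lt_or_ge k ((lo + hi) / 2) with h | h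
        · exact lt_trans (monoB h hmidlen) hcmp
        · have : k = (lo + hi) / 2 := by omega
          subst this; exact hcmp
      · rw [if_neg hcmp]
        refine (ih lo ((lo + hi) / 2) (by omega) (by omega) (by omega) hlo ?_).imp id
          (fun h => ⟨le_trans h.1 (by omega), h.2⟩)
        intro k hk hge
        rcases Nat.lt_or_ge ((lo + hi) / 2) k with h | h
        · exact le_trans (le_of_not_gt hcmp) (le_of_lt (monoB h hk))
        · have : k = (lo + hi) / 2 := by omega
          subst this; exact le_of_not_gt hcmp
    · rw [pvBisect_base _ _ _ _ hlt]
      have : lo = hi := by omega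
      subst this
      exact ⟨le_refl _, le_refl _, fun k hk => ⟨fun h => hlo k hk h, fun h => hhi k hk h⟩⟩

-- min-scan over an increasing prefix entirely below n: ends at the last element
lemma scanLow (n : Int) : ∀ (P : List Int) (x c : Int) (m? : Option Int),
    (x :: P).Pairwise (· < ·) → (∀ y ∈ x :: P, y < n) →
    (∀ m, m? = some m → n - x < m) →
    (x :: P).foldl (pvScanStep n) (c, m?) =
      ((x :: P).getLast (by simp), some (n - (x :: P).getLast (by simp))) := by
  intro P
  induction P with
  | nil =>
    intro x c m? _ hlt hm
    have hx : x < n := hlt x (by simp)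
    have habs : pvAbs (x - n) = n - x := by unfold pvAbs; rw [if_pos (by omega)]; ring
    cases m? with
    | none => simp [pvScanStep, habs]
    | some m =>
      have := hm m rfl
      simp [pvScanStep, habs]
      omega
  | cons y P ih =>
    intro x c m? hpw hlt hm
    have hx : x < n := hlt x (by simp)
    have habs : pvAbs (x - n) = n - x := by unfold pvAbs; rw [if_pos (by omega)]; ring
    have hstep : pvScanStep n (c, m?) x = (x, some (n - x)) := by
      cases m? with
      | none => simp [pvScanStep, habs]
      | some m =>
        have := hm m rfl
        simp [pvScanStep, habs]
        omega
    have hxy : x < y := (List.pairwise_cons.mp hpw).1 y (by simp)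
    have := ih y x (some (n - x)) (List.pairwise_cons.mp hpw).2
      (fun z hz => hlt z (List.mem_cons_of_mem _ hz))
      (fun m hme => by injection hme with h; omega)
    calc (x :: y :: P).foldl (pvScanStep n) (c, m?)
        = (y :: P).foldl (pvScanStep n) (x, some (n - x)) := by rw [List.foldl_cons, hstep]
      _ = _ := by rw [this]; simp [List.getLast_cons]

-- no element with distance ≥ m changes the state
lemma scanNoImprove (n : Int) : ∀ (S : List Int) (c m : Int),
    (∀ x ∈ S, ¬ (pvAbs (x - n) < m)) →
    S.foldl (pvScanStep n) (c, some m) = (c, some m) := by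
  intro S
  induction S with
  | nil => intro c m _; rfl
  | cons x S ih =>
    intro c m h
    rw [List.foldl_cons, show pvScanStep n (c, some m) x = (c, some m) by
      simp [pvScanStep, if_neg (h x (by simp))]]
    exact ih c m (fun z hz => h z (List.mem_cons_of_mem _ hz))


-- table endpoints as getElem
lemma hL0 : pvPalB[0]'(by rw [lenB]; omega) = 11 := by
  rw [← getB_eq 0 (by rw [lenB]; omega)]
  simpa using firstB

lemma hLlast : pvPalB[pvPalB.length - 1]'(by rw [lenB]; omega) = 99999 := by
  have h := PySem.List.pyGetD_neg_ofNat pvPalB 1 0 (by omega) (by rw [lenB]; omega)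
  rw [← h]
  simpa using lastB

lemma get0B : PySem.List.pyGetD pvPalB 0 0 = pvPalB[0]'(by rw [lenB]; omega) := by
  rw [← getB_eq 0 (by rw [lenB]; omega)]
  norm_num

lemma getLastB : PySem.List.pyGetD pvPalB (-1) 0 = pvPalB[pvPalB.length - 1]'(by rw [lenB]; omega) := by
  have h := PySem.List.pyGetD_neg_ofNat pvPalB 1 0 (by omega) (by rw [lenB]; omega)
  simpa using h

lemma getB_le {i j : Nat} (hij : i ≤ j) (hj : j < pvPalB.length) :
    pvPalB[i]'(by omega) ≤ pvPalB[j] := by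
  rcases Nat.lt_or_ge i j with h | h
  · exact le_of_lt (monoB h hj)
  · have : i = j := by omega
    subst this
    exact le_refl _

theorem ab_eq (n : Int) : find_closest_palindrome n = find_closest_palindrome_alt n := by
  have hlen : pvPalB.length = 1089 := lenB
  have hA : find_closest_palindrome n =
      (if pvPalsA.contains n = true then n
       else if n < PySem.List.pyGetD pvPalsA 0 0 then PySem.List.pyGetD pvPalsA 0 0
       else if PySem.List.pyGetD pvPalsA (-1) 0 < n then PySem.List.pyGetD pvPalsA (-1) 0
       else (pvPalsA.foldl (pvScanStep n) (0, none)).1) := rfl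
  rw [palsA_eq_palB, firstB, lastB] at hA
  obtain ⟨-, hrle, hchar⟩ := pvBisect_spec n pvPalB.length 0 pvPalB.length (by omega) (by omega)
    (le_refl _) (fun k hk h => absurd h (Nat.not_lt_zero k)) (fun k hk h => absurd hk (by omega))
  set r := pvBisect pvPalB n 0 pvPalB.length with hr
  have hB : find_closest_palindrome_alt n =
      (if r = 0 then PySem.List.pyGetD pvPalB 0 0
       else if r = pvPalB.length then PySem.List.pyGetD pvPalB (-1) 0
       else if n - PySem.List.pyGetD pvPalB ((r : Int) - 1) 0 ≤ PySem.List.pyGetD pvPalB (r : Int) 0 - n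
         then PySem.List.pyGetD pvPalB ((r : Int) - 1) 0
         else PySem.List.pyGetD pvPalB (r : Int) 0) := rfl
  rw [hA, hB]
  by_cases hc : pvPalB.contains n = true
  · -- n is a palindrome: both return n
    rw [if_pos hc]
    obtain ⟨k0, hk0, hk0eq⟩ := List.mem_iff_getElem.mp (List.contains_iff_mem.mp hc)
    have hrk : r ≤ k0 := by
      by_contra h
      push Not at h
      have := (hchar k0 hk0).1 h
      omega
    have hrlen : r < pvPalB.length := lt_of_le_of_lt hrk hk0
    have hLr : pvPalB[r] = n := by
      have h1 : n ≤ pvPalB[r] := (hchar r hrlen).2 (le_refl _)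
      rcases Nat.lt_or_ge r k0 with h | h
      · have := monoB h hk0; omega
      · have hrk0 : r = k0 := by omega
        subst hrk0; omega
    by_cases hr0 : r = 0
    · rw [if_pos hr0, get0B]
      simp only [hr0] at hLr
      exact hLr.symm
    · rw [if_neg hr0, if_neg (by omega)]
      have hleft : PySem.List.pyGetD pvPalB ((r : Int) - 1) 0 = pvPalB[r - 1]'(by omega) := by
        rw [show ((r : Int) - 1) = (((r - 1 : Nat)) : Int) by omega]
        exact getB_eq _ (by omega)
      have hlt : pvPalB[r - 1]'(by omega) < n := (hchar (r - 1) (by omega)).1 (by omega)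
      rw [hleft, getB_eq r hrlen, hLr, if_neg (by omega)]
  · rw [if_neg hc]
    have hmemn : n ∉ pvPalB := fun h => hc (List.contains_iff_mem.mpr h)
    by_cases h1 : n < 11
    · -- below the table: both return 11
      rw [if_pos h1]
      have hr0 : r = 0 := by
        by_contra h
        have := (hchar 0 (by omega)).1 (by omega)
        rw [hL0] at this
        omega
      rw [if_pos hr0, get0B, hL0]
    · rw [if_neg h1]
      by_cases h2 : 99999 < n
      · -- above the table: both return 99999
        rw [if_pos h2]
        have hrlen : r = pvPalB.length := by
          by_contra h
          have hge := (hchar r (by omega)).2 (le_refl _)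
          have hle : pvPalB[r]'(by omega) ≤ pvPalB[pvPalB.length - 1]'(by omega) :=
            getB_le (by omega) (by omega)
          rw [hLlast] at hle
          omega
        rw [if_neg (by omega), if_pos hrlen, getLastB, hLlast]
      · -- interior: min-scan vs neighbour pick
        rw [if_neg h2]
        have hr0 : r ≠ 0 := by
          intro h
          have hge := (hchar 0 (by omega)).2 (by omega)
          rw [hL0] at hge
          have : n = 11 := by omega
          have : n ∈ pvPalB := by
            rw [this, ← hL0]
            exact List.getElem_mem _
          exact hmemn this
        have hrlen : r < pvPalB.length := by
          rcases Nat.lt_or_ge r pvPalB.length with h | h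
          · exact h
          · exfalso
            have := (hchar (pvPalB.length - 1) (by omega)).1 (by omega)
            rw [hLlast] at this
            omega
        have hrge : n ≤ pvPalB[r] := (hchar r hrlen).2 (le_refl _)
        have hrne : pvPalB[r] ≠ n := fun h => hmemn (h ▸ List.getElem_mem hrlen)
        have hright : n < pvPalB[r] := lt_of_le_of_ne hrge (fun h => hrne h.symm)
        have hleftlt : pvPalB[r - 1]'(by omega) < n := (hchar (r - 1) (by omega)).1 (by omega)
        -- prefix of the scan
        have htake_len : (pvPalB.take r).length = r := by rw [List.length_take]; omega
        obtain ⟨x, P, hxP⟩ : ∃ x P, pvPalB.take r = x :: P := by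
          cases h : pvPalB.take r with
          | nil => rw [h] at htake_len; simp at htake_len; omega
          | cons a l => exact ⟨a, l, rfl⟩
        have hpwT : (x :: P).Pairwise (· < ·) := hxP ▸ pairB.sublist (List.take_sublist r pvPalB)
        have hallT : ∀ y ∈ x :: P, y < n := by
          rw [← hxP]
          intro y hy
          obtain ⟨i, hi, hieq⟩ := List.mem_iff_getElem.mp hy
          rw [List.getElem_take] at hieq
          rw [htake_len] at hi
          have hlt2 := (hchar i (by omega)).1 (by omega)
          rwa [hieq] at hlt2
        have hfoldT := scanLow n P x 0 none hpwT hallT (by intro m h; cases h)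
        have hlastT : (x :: P).getLast (by simp) = pvPalB[r - 1]'(by omega) := by
          have h1 := List.getLast_eq_getElem (l := pvPalB.take r) (by rw [hxP]; simp)
          rw [List.getElem_take] at h1
          simp only [htake_len] at h1
          simp only [hxP] at h1
          exact h1
        -- the scan result
        have hscan : (pvPalB.foldl (pvScanStep n) (0, none)).1 =
            if pvPalB[r] - n < n - pvPalB[r - 1]'(by omega) then pvPalB[r] else pvPalB[r - 1]'(by omega) := by
          conv_lhs => rw [← List.take_append_drop r pvPalB]
          rw [List.foldl_append, hxP, hfoldT, hlastT,
            List.drop_eq_getElem_cons hrlen, List.foldl_cons]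
          have habs2 : pvAbs (pvPalB[r] - n) = pvPalB[r] - n := by
            unfold pvAbs; rw [if_neg (by omega)]
          have hrest : ∀ z ∈ pvPalB.drop (r + 1), pvPalB[r] < z := by
            intro z hz
            obtain ⟨i, hi, hieq⟩ := List.mem_iff_getElem.mp hz
            rw [List.getElem_drop] at hieq
            exact hieq ▸ monoB (by omega) (by simp at hi; omega)
          by_cases hcase : pvPalB[r] - n < n - pvPalB[r - 1]'(by omega)
          · rw [show pvScanStep n (pvPalB[r - 1]'(by omega), some (n - pvPalB[r - 1]'(by omega))) pvPalB[r]
                = (pvPalB[r], some (pvPalB[r] - n)) by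
              simp [pvScanStep, habs2]; omega]
            rw [scanNoImprove n _ _ _ (fun z hz => by
              have h3 := hrest z hz
              have habs3 : pvAbs (z - n) = z - n := by unfold pvAbs; rw [if_neg (by omega)]
              omega)]
            rw [if_pos hcase]
          · rw [show pvScanStep n (pvPalB[r - 1]'(by omega), some (n - pvPalB[r - 1]'(by omega))) pvPalB[r]
                = (pvPalB[r - 1]'(by omega), some (n - pvPalB[r - 1]'(by omega))) by
              simp [pvScanStep, habs2]; omega]
            rw [scanNoImprove n _ _ _ (fun z hz => by
              have h3 := hrest z hz
              have habs3 : pvAbs (z - n) = z - n := by unfold pvAbs; rw [if_neg (by omega)]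
              omega)]
            rw [if_neg hcase]
        -- assemble
        have hleft : PySem.List.pyGetD pvPalB ((r : Int) - 1) 0 = pvPalB[r - 1]'(by omega) := by
          rw [show ((r : Int) - 1) = (((r - 1 : Nat)) : Int) by omega]
          exact getB_eq _ (by omega)
        rw [hscan, if_neg hr0, if_neg (show ¬ r = pvPalB.length by omega), hleft, getB_eq r hrlen]
        by_cases hcase : pvPalB[r] - n < n - pvPalB[r - 1]'(by omega)
        · rw [if_pos hcase, if_neg (by omega)]
        · rw [if_neg hcase, if_pos (by omega)]

-- ===== VERDICT (by name: the statement is the Claim_ definition above) =====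
theorem find_closest_palindrome_spec : Claim_equal_find_closest_palindrome := by
  intro n _
  unfold Spec_find_closest_palindrome
  exact ab_eq n
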